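-- pv_equiv track=rewrite | github.com/Anitha914/ai_indoor_navigation_fyp_project | ai_indoor_navigation_nav/outdoor_controller.py | generate_chunked_instructions
-- ===== SOURCE A (Python) =====
-- def generate_chunked_instructions(total_steps):
--     instructions = []
--
--     CHUNK = 40
--     chunks = total_steps // CHUNK
--     remainder = total_steps % CHUNK
--
--     phrases = [
--         "Walk straight for about {n} steps.",
--         "Continue forward on the same path for another {n} steps.",
--         "Keep moving straight for roughly {n} more steps.",
--         "Walk forward a little more, around {n} steps."
--     ]
--
--     for i in range(chunks):
--         phrase = phrases[i % len(phrases)]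
--         instructions.append(phrase.format(n=CHUNK))
--
--         if chunks >= 3 and i == chunks // 2:
--             instructions.append("You are about halfway to the next turn.")
--
--         if i == chunks - 2:
--             instructions.append("The turn is coming up soon.")
--
--     if remainder > 0:
--         instructions.append(f"Walk straight for about {remainder} steps.")
--
--     return instructions
-- ===== SOURCE B (Python) =====
-- def generate_chunked_instructions(total_steps):
--     chunks, remainder = divmod(total_steps, 40)
--     tail = [f"Walk straight for about {remainder} steps."] if remainder > 0 else []
--     if chunks <= 0:
--         return tail
--     base = [p.format(n=40) for p in [
--         "Walk straight for about {n} steps.",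
--         "Continue forward on the same path for another {n} steps.",
--         "Keep moving straight for roughly {n} more steps.",
--         "Walk forward a little more, around {n} steps."]]
--     P = (base * ((chunks + 3) // 4))[:chunks]
--     if chunks >= 3:
--         h, t = chunks // 2, chunks - 2
--         return (P[:h+1] + ["You are about halfway to the next turn."]
--                 + P[h+1:t+1] + ["The turn is coming up soon."]
--                 + P[t+1:] + tail)
--     if chunks == 2:
--         return P[:1] + ["The turn is coming up soon."] + P[1:] + tail
--     return P + tail
-- ===== Notes on version B (the rewrite author's own statement) =====
-- stated objective: faster
-- what changed: B has no per-chunk loop: it formats the four phrases once, builds the cyclic phrase list by list multiplication plus one slice, and returns a concatenation of slice segments around the two markers, instead of A's per-iteration format-and-append with inline marker conditionals.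
import Mathlib
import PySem

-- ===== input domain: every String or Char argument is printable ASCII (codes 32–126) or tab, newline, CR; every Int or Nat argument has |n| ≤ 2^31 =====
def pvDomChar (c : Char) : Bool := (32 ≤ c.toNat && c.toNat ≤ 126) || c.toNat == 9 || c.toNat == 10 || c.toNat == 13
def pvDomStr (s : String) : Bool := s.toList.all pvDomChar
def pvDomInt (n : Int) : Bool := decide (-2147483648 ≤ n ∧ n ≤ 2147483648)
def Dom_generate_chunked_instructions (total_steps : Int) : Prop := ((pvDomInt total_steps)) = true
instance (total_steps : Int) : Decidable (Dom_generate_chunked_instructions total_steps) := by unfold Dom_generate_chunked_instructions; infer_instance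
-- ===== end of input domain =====

-- B has no per-chunk loop: it formats the four phrases once, builds the cyclic phrase list by
-- list repetition plus one slice, and returns a concatenation of slice segments around the two
-- markers (measured faster in a timing run: no per-chunk format call); equal on all inputs.

-- ===== PORT A =====
def pvPhrasesA : List String :=
  ["Walk straight for about {n} steps.",
   "Continue forward on the same path for another {n} steps.",
   "Keep moving straight for roughly {n} more steps.",
   "Walk forward a little more, around {n} steps."]

-- phrase.format(n=40): the only placeholder in these templates is {n}, so format is exactly
-- one replace of "{n}" by str(40).
def generate_chunked_instructions (total_steps : Int) : List String :=
  let CHUNK : Int := 40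
  let chunks := PySem.Int.floordiv total_steps CHUNK
  let remainder := PySem.Int.mod total_steps CHUNK
  let instructions :=
    (PySem.List.pyRange 0 chunks 1).foldl (fun acc i =>
      let acc1 := acc ++ [PySem.Str.replace (PySem.List.pyGetD pvPhrasesA (PySem.Int.mod i 4) "") "{n}" (PySem.Int.toStr CHUNK)]
      let acc2 := if chunks ≥ 3 ∧ i = PySem.Int.floordiv chunks 2 then acc1 ++ ["You are about halfway to the next turn."] else acc1
      if i = chunks - 2 then acc2 ++ ["The turn is coming up soon."] else acc2) []
  if remainder > 0 then instructions ++ ["Walk straight for about " ++ PySem.Int.toStr remainder ++ " steps."]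
  else instructions

-- ===== PORT B =====
def pvTemplatesB : List String :=
  ["Walk straight for about {n} steps.",
   "Continue forward on the same path for another {n} steps.",
   "Keep moving straight for roughly {n} more steps.",
   "Walk forward a little more, around {n} steps."]

-- base * k (Python list repetition) is ported as flatten (replicate k base); k ≥ 0 holds
-- in the branch where it is used (chunks > 0), so toNat is exact.
def generate_chunked_instructions_alt (total_steps : Int) : List String :=
  let chunks := PySem.Int.floordiv total_steps 40
  let remainder := PySem.Int.mod total_steps 40
  let tail := if remainder > 0 then ["Walk straight for about " ++ PySem.Int.toStr remainder ++ " steps."] else []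
  if chunks ≤ 0 then tail
  else
    let base := pvTemplatesB.map (fun p => PySem.Str.replace p "{n}" (PySem.Int.toStr 40))
    let P := PySem.List.slice (List.flatten (List.replicate (PySem.Int.floordiv (chunks + 3) 4).toNat base)) none (some chunks)
    if chunks ≥ 3 then
      let h := PySem.Int.floordiv chunks 2
      let t := chunks - 2
      PySem.List.slice P none (some (h + 1)) ++ ["You are about halfway to the next turn."]
        ++ PySem.List.slice P (some (h + 1)) (some (t + 1)) ++ ["The turn is coming up soon."]
        ++ PySem.List.slice P (some (t + 1)) none ++ tail
    else if chunks = 2 then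
      PySem.List.slice P none (some 1) ++ ["The turn is coming up soon."] ++ PySem.List.slice P (some 1) none ++ tail
    else P ++ tail

-- ===== PRECONDITION & SPEC =====
def Spec_generate_chunked_instructions (total_steps : Int) (out : List String) : Prop := out = generate_chunked_instructions_alt total_steps
instance (total_steps : Int) (out : List String) : Decidable (Spec_generate_chunked_instructions total_steps out) := by unfold Spec_generate_chunked_instructions; infer_instance

-- ===== CLAIM (what is proved, stated in full; the proofs are below) =====
def Claim_equal_generate_chunked_instructions : Prop := ∀ (total_steps : Int), Dom_generate_chunked_instructions total_steps → Spec_generate_chunked_instructions total_steps (generate_chunked_instructions total_steps)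

-- ===== LEMMAS AND PROOFS =====

-- the phrase produced for loop index i (shared per-index expression of both ports)
def pvQ (i : Int) : String :=
  PySem.Str.replace (PySem.List.pyGetD pvPhrasesA (PySem.Int.mod i 4) "") "{n}" (PySem.Int.toStr 40)

def pvH : String := "You are about halfway to the next turn."
def pvT : String := "The turn is coming up soon."

-- what A's loop body emits for index i
def pvG (c i : Int) : List String :=
  [pvQ i] ++ (if c ≥ 3 ∧ i = PySem.Int.floordiv c 2 then [pvH] else [])
          ++ (if i = c - 2 then [pvT] else [])

-- A's foldl is the flatMap of the per-index emission
lemma pvAcore (c : Int) :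
    ((PySem.List.pyRange 0 c 1).foldl (fun acc i =>
      let acc1 := acc ++ [PySem.Str.replace (PySem.List.pyGetD pvPhrasesA (PySem.Int.mod i 4) "") "{n}" (PySem.Int.toStr 40)]
      let acc2 := if c ≥ 3 ∧ i = PySem.Int.floordiv c 2 then acc1 ++ ["You are about halfway to the next turn."] else acc1
      if i = c - 2 then acc2 ++ ["The turn is coming up soon."] else acc2) [])
    = (PySem.List.pyRange 0 c 1).flatMap (pvG c) := by
  have h : (fun (acc : List String) (i : Int) =>
      let acc1 := acc ++ [PySem.Str.replace (PySem.List.pyGetD pvPhrasesA (PySem.Int.mod i 4) "") "{n}" (PySem.Int.toStr 40)]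
      let acc2 := if c ≥ 3 ∧ i = PySem.Int.floordiv c 2 then acc1 ++ ["You are about halfway to the next turn."] else acc1
      if i = c - 2 then acc2 ++ ["The turn is coming up soon."] else acc2)
      = fun acc i => acc ++ pvG c i := by
    funext acc i
    simp only [pvG, pvQ, pvH, pvT]
    split_ifs <;> simp
  rw [h, PySem.List.foldl_append_eq_flatMap]
  simp

-- below position h no marker fires
lemma pvNoMark (q : Nat → String) (H T : String) (h t m : Nat) (hm : m ≤ h) (hht : h ≤ t) :
    (List.range m).flatMap (fun k => [q k] ++ (if k = h then [H] else []) ++ (if k = t then [T] else []))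
      = (List.range m).map q := by
  rw [List.flatMap_congr (g := fun k => [q k])]
  · exact (List.map_eq_flatMap).symm
  · intro k hk
    have hk' := List.mem_range.mp hk
    have h1 : k ≠ h := by omega
    have h2 : k ≠ t := by omega
    simp [h1, h2]

-- up to any m with h < m ≤ t only the halfway marker has been emitted, right after element h
lemma pvHalf (q : Nat → String) (H T : String) (h t : Nat) (hht : h < t) :
    ∀ m, h < m → m ≤ t →
    (List.range m).flatMap (fun k => [q k] ++ (if k = h then [H] else []) ++ (if k = t then [T] else []))
      = ((List.range m).map q).take (h+1) ++ H :: ((List.range m).map q).drop (h+1) := by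
  intro m
  induction m with
  | zero => omega
  | succ m ih =>
    intro hm1 hm2
    rw [List.range_succ, List.flatMap_append, List.map_append]
    rcases Nat.lt_or_ge h m with hlt | hge
    · have hmt : m ≠ t := by omega
      have hmh : m ≠ h := by omega
      rw [ih hlt (by omega)]
      have hlen : ((List.range m).map q).length = m := by simp
      rw [List.take_append_of_le_length (by omega),
          List.drop_append_of_le_length (by omega)]
      simp [hmt, hmh]
    · have hmh : m = h := by omega
      subst hmh
      have hmt : m ≠ t := by omega
      rw [pvNoMark q H T m t m (le_refl m) (le_of_lt hht)]
      rw [List.take_of_length_le (by simp), List.drop_eq_nil_of_le (by simp)]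
      simp [hmt]

-- splice characterisation of the whole marker-emitting flatMap, for h ≤ t < n
lemma pvSplice (q : Nat → String) (H T : String) (h t : Nat) (hht : h ≤ t) :
    ∀ n, t < n →
    (List.range n).flatMap (fun k => [q k] ++ (if k = h then [H] else []) ++ (if k = t then [T] else []))
      = ((List.range n).map q).take (h+1) ++ H ::
        (((((List.range n).map q).take (t+1)).drop (h+1)) ++ T :: ((List.range n).map q).drop (t+1)) := by
  intro n
  induction n with
  | zero => omega
  | succ n ih =>
    intro hn
    rw [List.range_succ, List.flatMap_append, List.map_append]
    have hq : ((List.range n).map q).length = n := by simp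
    rcases Nat.lt_or_ge t n with hlt | hge
    · have hnh : n ≠ h := by omega
      have hnt : n ≠ t := by omega
      rw [ih hlt]
      rw [List.take_append_of_le_length (i := h+1) (by omega),
          List.take_append_of_le_length (i := t+1) (by omega),
          List.drop_append_of_le_length (i := t+1) (by omega)]
      simp [hnh, hnt]
    · have htn : t = n := by omega
      subst htn
      rcases Nat.lt_or_eq_of_le hht with hlt | heq
      · have hth : t ≠ h := by omega
        rw [pvHalf q H T h t hlt t hlt (le_refl t)]
        simp only [List.map_cons, List.map_nil]
        have e1 : List.take (h+1) (List.map q (List.range t) ++ [q t])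
            = List.take (h+1) (List.map q (List.range t)) :=
          List.take_append_of_le_length (by omega)
        have e2 : List.take (t+1) (List.map q (List.range t) ++ [q t])
            = List.map q (List.range t) ++ [q t] := List.take_of_length_le (by simp)
        have e3 : List.drop (h+1) (List.map q (List.range t) ++ [q t])
            = List.drop (h+1) (List.map q (List.range t)) ++ [q t] :=
          List.drop_append_of_le_length (by omega)
        have e4 : List.drop (t+1) (List.map q (List.range t) ++ [q t]) = [] :=
          List.drop_eq_nil_of_le (by simp)
        rw [e1, e2, e3, e4]
        simp [hth]
      · subst heq
        rw [pvNoMark q H T h h h (le_refl h) (le_refl h)]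
        simp only [List.map_cons, List.map_nil]
        have e2 : List.take (h+1) (List.map q (List.range h) ++ [q h])
            = List.map q (List.range h) ++ [q h] := List.take_of_length_le (by simp)
        have e4 : List.drop (h+1) (List.map q (List.range h) ++ [q h]) = [] :=
          List.drop_eq_nil_of_le (by simp)
        rw [e2, e4]
        simp

-- the formatted base list of B is exactly [pvQ 0, pvQ 1, pvQ 2, pvQ 3]
lemma pvBase :
    pvTemplatesB.map (fun p => PySem.Str.replace p "{n}" (PySem.Int.toStr 40))
      = [pvQ 0, pvQ 1, pvQ 2, pvQ 3] := by
  simp only [pvTemplatesB, pvQ, List.map_cons, List.map_nil, List.cons.injEq, and_true]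
  refine ⟨?_, ?_, ?_, ?_⟩ <;> congr 1

-- flatten of m copies of the base list enumerates pvQ cyclically
lemma pvRep (m : Nat) :
    List.flatten (List.replicate m [pvQ 0, pvQ 1, pvQ 2, pvQ 3])
      = (List.range (4 * m)).map (fun (k : Nat) => pvQ (k : Int)) := by
  induction m with
  | zero => simp
  | succ m ih =>
    have hr : List.range (4 * (m + 1)) = List.range (4 * m) ++ [4*m, 4*m+1, 4*m+2, 4*m+3] := by
      have h4 : 4 * (m + 1) = 4 * m + 4 := by ring
      rw [h4]
      simp [List.range_succ, List.append_assoc]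
    have qr : ∀ (j r : Nat), (4*m + j) % 4 = r → r < 4 →
        pvQ ((4*m + j : Nat) : Int) = pvQ ((r : Nat) : Int) := by
      intro j r hjr hr4
      simp only [pvQ]
      congr 2
      have h1 : PySem.Int.mod ((4*m + j : Nat) : Int) 4 = (((4*m + j) % 4 : Nat) : Int) := by
        exact_mod_cast PySem.Int.mod_natCast (4*m + j) 4
      have h2 : PySem.Int.mod ((r : Nat) : Int) 4 = ((r % 4 : Nat) : Int) := by
        exact_mod_cast PySem.Int.mod_natCast r 4
      rw [h1, h2, hjr, Nat.mod_eq_of_lt hr4]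
    have q0 := qr 0 0 (by omega) (by omega)
    have q1 := qr 1 1 (by omega) (by omega)
    have q2 := qr 2 2 (by omega) (by omega)
    have q3 := qr 3 3 (by omega) (by omega)
    simp only [Nat.add_zero] at q0
    rw [List.replicate_succ', List.flatten_append, ih, hr, List.map_append,
        List.append_right_inj]
    simp only [List.flatten_cons, List.flatten_nil, List.append_nil, List.map_cons, List.map_nil]
    rw [q0, q1, q2, q3]
    push_cast
    rfl

-- B's repeated-and-sliced phrase list is the enumerated phrase list of length n
lemma pvP (n : Nat) :
    PySem.List.slice
      (List.flatten (List.replicate (PySem.Int.floordiv ((n : Int) + 3) 4).toNat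
        (pvTemplatesB.map (fun p => PySem.Str.replace p "{n}" (PySem.Int.toStr 40)))))
      none (some (n : Int))
      = (List.range n).map (fun (k : Nat) => pvQ (k : Int)) := by
  rw [pvBase]
  have e : PySem.Int.floordiv ((n : Int) + 3) 4 = (((n + 3) / 4 : Nat) : Int) := by
    exact_mod_cast PySem.Int.floordiv_natCast (n + 3) 4
  rw [e, Int.toNat_natCast, pvRep, PySem.List.slice_to_natCast, ← List.map_take, List.take_range]
  have hmin : min n (4 * ((n + 3) / 4)) = n := by omega
  rw [hmin]

-- ===== VERDICT (by name: the statement is the Claim_ definition above) =====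
theorem generate_chunked_instructions_spec : Claim_equal_generate_chunked_instructions := by
  intro ts _
  simp only [Spec_generate_chunked_instructions, generate_chunked_instructions,
    generate_chunked_instructions_alt]
  rw [pvAcore (PySem.Int.floordiv ts 40)]
  rcases (by omega : PySem.Int.floordiv ts 40 ≤ 0 ∨ 0 < PySem.Int.floordiv ts 40) with hc0 | hcpos
  · rw [PySem.List.pyRange_one_eq_nil hc0, if_pos hc0]
    simp only [List.flatMap_nil]
    split_ifs <;> simp
  · rw [if_neg (show ¬ PySem.Int.floordiv ts 40 ≤ 0 by omega)]
    generalize hceq : PySem.Int.floordiv ts 40 = c at hcpos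
    lift c to ℕ using (le_of_lt hcpos) with n
    have hn1 : 1 ≤ n := by exact_mod_cast hcpos
    rw [pvP n]
    rw [PySem.List.pyRange_zero]
    simp only [Int.toNat_natCast]
    rw [List.flatMap_map]
    by_cases h3n : 3 ≤ n
    · -- n ≥ 3 : both markers present; halfway at n/2, turn at n-2
      have hfd : PySem.Int.floordiv (n : Int) 2 = ((n / 2 : Nat) : Int) := by
        exact_mod_cast PySem.Int.floordiv_natCast n 2
      have hg : (fun (a : Nat) => pvG (n : Int) (a : Int))
          = (fun (k : Nat) => [pvQ (k : Int)]
              ++ (if k = n / 2 then [pvH] else [])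
              ++ (if k = n - 2 then [pvT] else [])) := by
        funext a
        simp only [pvG]
        have c1 : ((n : Int) ≥ 3 ∧ (a : Int) = PySem.Int.floordiv (n : Int) 2) ↔ a = n / 2 := by
          rw [hfd]; constructor
          · rintro ⟨-, h⟩; exact_mod_cast h
          · intro h; exact ⟨by exact_mod_cast h3n, by exact_mod_cast h⟩
        have c2 : ((a : Int) = (n : Int) - 2) ↔ a = n - 2 := by omega
        rw [if_congr c1 rfl rfl, if_congr c2 rfl rfl]
      rw [hg]
      rw [pvSplice (fun (k : Nat) => pvQ (k : Int)) pvH pvT (n / 2) (n - 2) (by omega) n (by omega)]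
      rw [if_pos (show (n : Int) ≥ 3 by exact_mod_cast h3n)]
      have e5 : (n : Int) - 2 + 1 = (((n - 2) + 1 : Nat) : Int) := by push_cast; omega
      have e6 : PySem.Int.floordiv (n : Int) 2 + 1 = (((n / 2) + 1 : Nat) : Int) := by
        rw [hfd]; push_cast; omega
      rw [e5, e6, PySem.List.slice_to_natCast, PySem.List.slice_natCast,
          PySem.List.slice_from_natCast]
      rw [List.drop_take]
      split_ifs <;> simp [pvH, pvT]
    · -- n = 1 or n = 2 : concrete small cases
      have hn3 : n < 3 := by omega
      interval_cases n
      · rw [if_neg (show ¬ ((1 : Nat) : Int) ≥ 3 by norm_num),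
            if_neg (show ¬ ((1 : Nat) : Int) = 2 by norm_num)]
        split_ifs <;>
          simp [pvG, pvQ, List.range_succ, PySem.Int.mod, PySem.List.pyGetD,
            PySem.List.pyGet?, PySem.List.pyIdx?, pvPhrasesA]
      · rw [if_neg (show ¬ ((2 : Nat) : Int) ≥ 3 by norm_num),
            if_pos (show ((2 : Nat) : Int) = 2 by norm_num)]
        split_ifs <;>
          simp [pvG, pvQ, pvT, List.range_succ, PySem.Int.mod, PySem.List.pyGetD,
            PySem.List.pyGet?, PySem.List.pyIdx?, pvPhrasesA, PySem.Int.floordiv,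
            PySem.List.slice, PySem.List.clampIdx]
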